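-- pv_equiv track=rewrite | github.com/Seunghoon-Schini-Yang/Algorithm_Schini | 프로그래머스/unrated/152995. 인사고과/인사고과.py | solution
-- ===== SOURCE A (Python) =====
-- def solution(scores):
--     x, y = scores[0]
--     scores.sort(key=lambda x: (-x[0], x[1]))
--     memo = {}
--
--     my = scores[0][1]
--     for cx, cy in scores:
--         if cy < my:
--             if (cx, cy) == (x, y):
--                 return -1
--             continue
--         my = cy
--         memo[cx+cy] = memo.get(cx+cy, 0) + 1
--
--     goal = x + y
--     acc = 0
--     for score, val in sorted(memo.items(), reverse=True):
--         if score == goal: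
--             return acc + 1
--         acc += val
-- ===== SOURCE B (Python) =====
-- def solution(scores):
--     x, y = scores[0]
--     goal = x + y
--     scores.sort(key=lambda s: (-s[0], s[1]))
--     my = scores[0][1]
--     count = 0
--     for cx, cy in scores:
--         if cy < my:
--             if (cx, cy) == (x, y):
--                 return -1
--             continue
--         my = cy
--         if cx + cy > goal:
--             count += 1
--     return count + 1
-- ===== Notes on version B (the rewrite author's own statement) =====
-- stated objective: simpler
-- what changed: B drops A's memo dict and its whole second phase (sorting the dict items and scanning for the goal): it computes goal before sorting and fuses everything into the one eligibility pass, keeping a single integer count of eligible employees with a strictly larger sum, returning count+1.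
import Mathlib
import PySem

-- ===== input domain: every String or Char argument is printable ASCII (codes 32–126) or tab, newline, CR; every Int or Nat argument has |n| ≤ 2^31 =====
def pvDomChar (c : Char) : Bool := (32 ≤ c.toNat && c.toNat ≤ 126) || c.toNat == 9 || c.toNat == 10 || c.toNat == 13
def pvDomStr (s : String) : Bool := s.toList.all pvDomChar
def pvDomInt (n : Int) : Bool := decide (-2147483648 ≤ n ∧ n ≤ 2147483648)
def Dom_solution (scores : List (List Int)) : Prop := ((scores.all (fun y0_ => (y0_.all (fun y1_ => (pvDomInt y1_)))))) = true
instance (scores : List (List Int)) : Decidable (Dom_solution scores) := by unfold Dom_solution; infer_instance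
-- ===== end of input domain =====

-- B drops A's memo dict and second sorted scan, fusing everything into the single eligibility
-- pass with one integer counter (objective: simpler). Both A and B sort `scores` in place; the
-- equivalence proved here is about the return value (the mutation is the same sort in both).

-- ===== PORT A =====
-- 'cx, cy = …' unpacking of a 2-element row (Pre_ guarantees length 2, so pyGetD is exact)
def pvPairA (l : List Int) : Int × Int :=
  (PySem.List.pyGetD l 0 0, PySem.List.pyGetD l 1 0)

-- first loop of A: none = 'return -1'; some memo = loop finished with this memo
def pvLoopA (xy : Int × Int) : List (List Int) → Int → PySem.Dict Int Int → Option (PySem.Dict Int Int)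
  | [], _, memo => some memo
  | l :: rest, my, memo =>
    let c := pvPairA l
    if c.2 < my then
      if c = xy then none else pvLoopA xy rest my memo
    else
      pvLoopA xy rest c.2 (memo.modify (c.1 + c.2) 0 (· + 1))

-- second loop of A over sorted(memo.items(), reverse=True); falling off the loop returns
-- Python None — unreachable under Pre_ (goal is always a key of memo then); 0 is a placeholder
def pvPhase2 (goal : Int) : List (Int × Int) → Int → Int
  | [], _ => 0
  | (score, v) :: rest, acc => if score = goal then acc + 1 else pvPhase2 goal rest (acc + v)

def solution (scores : List (List Int)) : Int :=
  let xy := pvPairA (PySem.List.pyGetD scores 0 [])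
  let ss := PySem.List.sorted2 scores (fun l => -(PySem.List.pyGetD l 0 0)) (fun l => PySem.List.pyGetD l 1 0) false
  let my := PySem.List.pyGetD (PySem.List.pyGetD ss 0 []) 1 0
  match pvLoopA xy ss my PySem.Dict.empty with
  | none => -1
  | some memo =>
      pvPhase2 (xy.1 + xy.2) (PySem.List.sorted2 memo.items (fun p => p.1) (fun p => p.2) true) 0

-- ===== PORT B =====
-- B's single pass: early 'return -1' on a dominated copy of the target, otherwise one counter
def pvLoopB (x y goal : Int) : List (List Int) → Int → Int → Int
  | [], _, count => count + 1
  | l :: rest, my, count =>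
    let cx := PySem.List.pyGetD l 0 0
    let cy := PySem.List.pyGetD l 1 0
    if cy < my then
      if cx = x ∧ cy = y then -1 else pvLoopB x y goal rest my count
    else
      pvLoopB x y goal rest cy (if cx + cy > goal then count + 1 else count)

def solution_alt (scores : List (List Int)) : Int :=
  let h := PySem.List.pyGetD scores 0 []
  let x := PySem.List.pyGetD h 0 0
  let y := PySem.List.pyGetD h 1 0
  let goal := x + y
  let ss := PySem.List.sorted2 scores (fun s => -(PySem.List.pyGetD s 0 0)) (fun s => PySem.List.pyGetD s 1 0) false
  let my := PySem.List.pyGetD (PySem.List.pyGetD ss 0 []) 1 0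
  pvLoopB x y goal ss my 0

-- ===== PRECONDITION & SPEC =====
-- Pre_: scores is nonempty and every row has exactly 2 entries — otherwise Python A raises
-- (IndexError on scores[0] / ValueError on tuple unpacking).
def Pre_solution (scores : List (List Int)) : Prop :=
  scores ≠ [] ∧ ∀ l ∈ scores, l.length = 2
instance (scores : List (List Int)) : Decidable (Pre_solution scores) := by unfold Pre_solution; infer_instance

def pvWitness_solution : List (List Int) := [[2, 2], [1, 4], [3, 2]]

def Spec_solution (scores : List (List Int)) (out : Int) : Prop := out = solution_alt scores
instance (scores : List (List Int)) (out : Int) : Decidable (Spec_solution scores out) := by unfold Spec_solution; infer_instance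

-- ===== CLAIM (what is proved, stated in full; the proofs are below) =====
def Claim_equal_solution : Prop := ∀ (scores : List (List Int)), Dom_solution scores → Pre_solution scores → Spec_solution scores (solution scores)

-- ===== LEMMAS AND PROOFS =====

-- total of the memo values whose key (= score sum) exceeds goal
def pvSumAbove (goal : Int) (ps : List (Int × Int)) : Int :=
  ((ps.filter (fun p => decide (goal < p.1))).map (fun p => p.2)).sum

theorem pvSumAbove_perm {goal : Int} {ps qs : List (Int × Int)} (h : ps.Perm qs) :
    pvSumAbove goal ps = pvSumAbove goal qs :=
  List.Perm.sum_eq (List.Perm.map _ (List.Perm.filter _ h))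

-- the comparison sorted2 … true uses, and the (non-strict) lex order it establishes
def pvBefore (a b : Int × Int) : Bool :=
  decide (b.1 < a.1) || (!decide (a.1 < b.1) && decide (b.2 < a.2))

def pvLexGe (a b : Int × Int) : Prop := b.1 < a.1 ∨ (b.1 = a.1 ∧ b.2 ≤ a.2)

theorem pvLexGe_of_before {a b : Int × Int} (h : pvBefore a b = true) : pvLexGe a b := by
  unfold pvBefore at h; unfold pvLexGe
  simp only [Bool.or_eq_true, Bool.and_eq_true, Bool.not_eq_true', decide_eq_true_eq,
    decide_eq_false_iff_not] at h
  omega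

theorem pvLexGe_of_not_before {a b : Int × Int} (h : pvBefore a b = false) : pvLexGe b a := by
  unfold pvBefore at h; unfold pvLexGe
  simp only [Bool.or_eq_false_iff, Bool.and_eq_false_iff, Bool.not_eq_false', decide_eq_true_eq,
    decide_eq_false_iff_not] at h
  omega

theorem pvLexGe_trans {a b c : Int × Int} (h1 : pvLexGe a b) (h2 : pvLexGe b c) : pvLexGe a c := by
  unfold pvLexGe at *; omega

theorem pvInsertBy_pairwise (x : Int × Int) (ys : List (Int × Int))
    (h : ys.Pairwise pvLexGe) : (PySem.List.insertBy pvBefore x ys).Pairwise pvLexGe := by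
  induction ys with
  | nil => simp [PySem.List.insertBy]
  | cons y ys ih =>
    rw [List.pairwise_cons] at h
    by_cases hb : pvBefore x y = true
    · rw [show PySem.List.insertBy pvBefore x (y :: ys) = x :: y :: ys by
        simp [PySem.List.insertBy, hb]]
      refine List.Pairwise.cons ?_ (List.Pairwise.cons h.1 h.2)
      intro z hz
      rcases List.mem_cons.mp hz with rfl | hz'
      · exact pvLexGe_of_before hb
      · exact pvLexGe_trans (pvLexGe_of_before hb) (h.1 z hz')
    · rw [show PySem.List.insertBy pvBefore x (y :: ys) = y :: PySem.List.insertBy pvBefore x ys by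
        simp [PySem.List.insertBy, hb]]
      refine List.Pairwise.cons ?_ (ih h.2)
      intro z hz
      rcases (PySem.List.mem_insertBy pvBefore x z ys).mp hz with rfl | hz'
      · exact pvLexGe_of_not_before (by simpa using hb)
      · exact h.1 z hz'

theorem pvFoldl_insertBy_pairwise (xs acc : List (Int × Int)) (h : acc.Pairwise pvLexGe) :
    (xs.foldl (fun acc x => PySem.List.insertBy pvBefore x acc) acc).Pairwise pvLexGe := by
  induction xs generalizing acc with
  | nil => exact h
  | cons x xs ih => exact ih _ (pvInsertBy_pairwise x acc h)

theorem pvSorted2_rev_pairwise (ps : List (Int × Int)) :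
    (PySem.List.sorted2 ps (fun p => p.1) (fun p => p.2) true).Pairwise pvLexGe := by
  have h : PySem.List.sorted2 ps (fun p => p.1) (fun p => p.2) true
      = ps.foldl (fun acc x => PySem.List.insertBy pvBefore x acc) [] := by
    simp only [PySem.List.sorted2]
    rfl
  rw [h]
  exact pvFoldl_insertBy_pairwise ps [] (by simp)

-- A's second loop on a strictly-descending-key list containing the goal key
theorem pvPhase2_eq (goal : Int) (ps : List (Int × Int))
    (hp : ps.Pairwise (fun a b => b.1 < a.1)) (hg : ∃ v, (goal, v) ∈ ps) :
    ∀ acc, pvPhase2 goal ps acc = acc + pvSumAbove goal ps + 1 := by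
  induction ps with
  | nil => exact absurd hg (by simp)
  | cons p rest ih =>
    obtain ⟨s, v0⟩ := p
    rw [List.pairwise_cons] at hp
    intro acc
    by_cases hs : s = goal
    · subst hs
      have hrest : pvSumAbove s ((s, v0) :: rest) = 0 := by
        unfold pvSumAbove
        have hnil : ((s, v0) :: rest).filter (fun p => decide (s < p.1)) = [] := by
          rw [List.filter_eq_nil_iff]
          intro p hp'
          rcases List.mem_cons.mp hp' with rfl | hp'
          · simp
          · have := hp.1 p hp'; simp; omega
        rw [hnil]; simp
      rw [hrest]
      simp [pvPhase2]
    · obtain ⟨v, hv⟩ := hg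
      have hvrest : (goal, v) ∈ rest := by
        rcases List.mem_cons.mp hv with heq | h'
        · exact absurd (congrArg Prod.fst heq).symm (by simpa using hs)
        · exact h'
      have hgs : goal < s := hp.1 _ hvrest
      have habove : pvSumAbove goal ((s, v0) :: rest) = v0 + pvSumAbove goal rest := by
        unfold pvSumAbove
        rw [show ((s, v0) :: rest).filter (fun p => decide (goal < p.1))
            = (s, v0) :: rest.filter (fun p => decide (goal < p.1)) by
          rw [List.filter_cons_of_pos]; simpa using hgs]
        simp
      rw [habove, show pvPhase2 goal ((s, v0) :: rest) acc = pvPhase2 goal rest (acc + v0) by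
        simp [pvPhase2, hs]]
      rw [ih hp.2 ⟨v, hvrest⟩ (acc + v0)]
      ring

-- bumping the value of one present key by 1, on the raw items list
theorem pvSumAbove_bump (goal s v : Int) :
    ∀ (its : List (Int × Int)), (its.map (fun p => p.1)).Nodup → (s, v) ∈ its →
    pvSumAbove goal (its.map (fun p => if p.1 == s then (s, v + 1) else p))
      = pvSumAbove goal its + (if goal < s then 1 else 0) := by
  intro its
  induction its with
  | nil => intro _ h; exact absurd h (by simp)
  | cons p rest ih =>
    intro hnd hmem
    simp only [List.map_cons, List.nodup_cons] at hnd
    by_cases hps : p.1 = s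
    · have hrest : rest.map (fun p => if p.1 == s then (s, v + 1) else p) = rest := by
        have hfix : ∀ q ∈ rest, (if q.1 == s then (s, v + 1) else q) = q := by
          intro q hq
          have hq1 : q.1 ≠ s := by
            intro hq1
            exact hnd.1 (by rw [hps, ← hq1]; exact List.mem_map.mpr ⟨q, hq, rfl⟩)
          simp [hq1]
        calc rest.map (fun p => if p.1 == s then (s, v + 1) else p)
            = rest.map id := List.map_congr_left (by simpa using hfix)
          _ = rest := List.map_id rest
      have hpv : p = (s, v) := by
        rcases List.mem_cons.mp hmem with heq | hin
        · exact heq.symm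
        · exact absurd (by rw [hps]; exact List.mem_map.mpr ⟨(s, v), hin, rfl⟩) hnd.1
      subst hpv
      simp only [List.map_cons, hrest]
      rw [show ((if ((s, v) : Int × Int).1 == s then ((s, v + 1) : Int × Int) else (s, v)) : Int × Int) = (s, v + 1) by simp]
      unfold pvSumAbove
      by_cases hg : goal < s
      · rw [List.filter_cons_of_pos (by simpa using hg),
            List.filter_cons_of_pos (by simpa using hg)]
        simp only [List.map_cons, List.sum_cons, if_pos hg]
        omega
      · rw [List.filter_cons_of_neg (by simpa using hg),
            List.filter_cons_of_neg (by simpa using hg)]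
        simp [hg]
    · have hmem' : (s, v) ∈ rest := by
        rcases List.mem_cons.mp hmem with heq | hin
        · exact absurd (congrArg Prod.fst heq).symm (by simpa using hps)
        · exact hin
      simp only [List.map_cons]
      rw [show ((if p.1 == s then ((s, v + 1) : Int × Int) else p) : Int × Int) = p by simp [hps]]
      unfold pvSumAbove
      by_cases hg : goal < p.1
      · rw [List.filter_cons_of_pos (by simpa using hg),
            List.filter_cons_of_pos (by simpa using hg)]
        have hih := ih hnd.2 hmem'
        unfold pvSumAbove at hih
        simp only [List.map_cons, List.sum_cons]
        omega
      · rw [List.filter_cons_of_neg (by simpa using hg),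
            List.filter_cons_of_neg (by simpa using hg)]
        exact ih hnd.2 hmem'

-- effect of one 'memo[s] = memo.get(s, 0) + 1' on keys, Nodup, and pvSumAbove
theorem pvModify_step (memo : PySem.Dict Int Int) (s goal : Int) (hnd : memo.keys.Nodup) :
    (memo.modify s 0 (· + 1)).keys.Nodup ∧
    (∀ k, k ∈ memo.keys → k ∈ (memo.modify s 0 (· + 1)).keys) ∧
    s ∈ (memo.modify s 0 (· + 1)).keys ∧
    pvSumAbove goal (memo.modify s 0 (· + 1)).items
      = pvSumAbove goal memo.items + (if goal < s then 1 else 0) := by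
  have hmod : memo.modify s 0 (· + 1) = memo.insert s (memo.getD s 0 + 1) := rfl
  by_cases hc : memo.contains s = true
  · obtain ⟨v, hv⟩ : ∃ v, memo.get? s = some v := by
      rw [PySem.Dict.contains_eq_isSome_get?] at hc
      exact Option.isSome_iff_exists.mp hc
    have hvmem : (s, v) ∈ memo.items := PySem.Dict.mem_items_of_get?_eq_some memo hv
    have hgd : memo.getD s 0 = v := by simp [PySem.Dict.getD, hv]
    have hitems : (memo.insert s (v + 1)).items
        = memo.items.map (fun p => if p.1 == s then (s, v + 1) else p) :=
      PySem.Dict.items_insert_of_contains memo (v + 1) hc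
    refine ⟨?_, ?_, ?_, ?_⟩
    · exact PySem.Dict.nodup_keys_insert memo s _ hnd
    · intro k hk
      rw [hmod, hgd, PySem.Dict.keys, hitems]
      rw [PySem.Dict.keys] at hk
      obtain ⟨p, hp, rfl⟩ := List.mem_map.mp hk
      by_cases hps : p.1 = s
      · rw [hps]
        exact List.mem_map.mpr ⟨(s, v + 1), List.mem_map.mpr ⟨p, hp, by simp [hps]⟩, rfl⟩
      · exact List.mem_map.mpr ⟨p, List.mem_map.mpr ⟨p, hp, by simp [hps]⟩, rfl⟩
    · rw [hmod, hgd, PySem.Dict.keys, hitems]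
      exact List.mem_map.mpr ⟨(s, v + 1), List.mem_map.mpr ⟨(s, v), hvmem, by simp⟩, rfl⟩
    · rw [hmod, hgd, hitems]
      exact pvSumAbove_bump goal s v memo.items hnd hvmem
  · have hc' : memo.contains s = false := by simpa using hc
    have hgd : memo.getD s 0 = 0 := by
      have hnone : memo.get? s = none := by
        rw [PySem.Dict.contains_eq_isSome_get?] at hc'
        exact Option.not_isSome_iff_eq_none.mp (by simp [hc'])
      simp [PySem.Dict.getD, hnone]
    have hitems : (memo.insert s (memo.getD s 0 + 1)).items = memo.items ++ [(s, memo.getD s 0 + 1)] :=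
      PySem.Dict.items_insert_of_not_contains memo (memo.getD s 0 + 1) hc'
    refine ⟨PySem.Dict.nodup_keys_insert memo s _ hnd, ?_, ?_, ?_⟩
    · intro k hk
      rw [hmod, PySem.Dict.keys, hitems]
      rw [PySem.Dict.keys] at hk
      simp only [List.map_append, List.mem_append]
      exact Or.inl hk
    · rw [hmod, PySem.Dict.keys, hitems]
      simp
    · rw [hmod, hitems]
      unfold pvSumAbove
      rw [List.filter_append]
      by_cases hg : goal < s
      · rw [show [(s, memo.getD s 0 + 1)].filter (fun p => decide (goal < p.1))
            = [(s, memo.getD s 0 + 1)] by simp [hg]]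
        simp [hg, hgd]
      · rw [show [(s, memo.getD s 0 + 1)].filter (fun p => decide (goal < p.1)) = [] by simp [hg]]
        simp [hg]

-- the joint loop invariant: B's fused pass against A's memo-building pass
theorem pvLoop_main (x y : Int) :
    ∀ (l : List (List Int)) (my : Int) (memo : PySem.Dict Int Int) (count : Int),
    memo.keys.Nodup →
    (pvLoopA (x, y) l my memo = none → pvLoopB x y (x + y) l my count = -1) ∧
    (∀ memo', pvLoopA (x, y) l my memo = some memo' →
      memo'.keys.Nodup ∧
      (x + y ∈ memo.keys ∨ (∃ l0 ∈ l, pvPairA l0 = (x, y)) → x + y ∈ memo'.keys) ∧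
      pvLoopB x y (x + y) l my count
        = count + (pvSumAbove (x + y) memo'.items - pvSumAbove (x + y) memo.items) + 1) := by
  intro l
  induction l with
  | nil =>
    intro my memo count hnd
    refine ⟨fun h => by simp [pvLoopA] at h, fun memo' h => ?_⟩
    have heq : memo = memo' := by simpa [pvLoopA] using h
    subst heq
    refine ⟨hnd, ?_, by simp [pvLoopB]⟩
    rintro (h | ⟨l0, hl0, _⟩)
    · exact h
    · exact absurd hl0 (by simp)
  | cons l0 rest ih =>
    intro my memo count hnd
    by_cases hlt : (pvPairA l0).2 < my
    · -- dominated row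
      by_cases hxy : pvPairA l0 = (x, y)
      · -- it is the target: both return -1 / loopA returns none
        have hAnone : pvLoopA (x, y) (l0 :: rest) my memo = none := by
          simp only [pvLoopA]
          rw [if_pos hlt, if_pos hxy]
        have h1 : (pvPairA l0).1 = x := by rw [hxy]
        have h2 : (pvPairA l0).2 = y := by rw [hxy]
        have hBneg : pvLoopB x y (x + y) (l0 :: rest) my count = -1 := by
          simp only [pvLoopB]
          rw [if_pos (by simpa [pvPairA] using hlt),
              if_pos ⟨by simpa [pvPairA] using h1, by simpa [pvPairA] using h2⟩]
        refine ⟨fun _ => hBneg, fun memo' h => ?_⟩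
        rw [hAnone] at h
        cases h
      · -- skipped row
        have hA : pvLoopA (x, y) (l0 :: rest) my memo = pvLoopA (x, y) rest my memo := by
          simp [pvLoopA, hlt, hxy]
        have hne : ¬((pvPairA l0).1 = x ∧ (pvPairA l0).2 = y) := by
          intro ⟨h1, h2⟩
          exact hxy (Prod.ext h1 h2)
        have hB : pvLoopB x y (x + y) (l0 :: rest) my count = pvLoopB x y (x + y) rest my count := by
          simp only [pvLoopB]
          rw [if_pos (by simpa [pvPairA] using hlt), if_neg (by simpa [pvPairA] using hne)]
        obtain ⟨ihn, ihs⟩ := ih my memo count hnd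
        refine ⟨fun h => by rw [hB]; exact ihn (by rwa [hA] at h), fun memo' h => ?_⟩
        obtain ⟨h1, h2, h3⟩ := ihs memo' (by rwa [hA] at h)
        refine ⟨h1, ?_, by rw [hB]; exact h3⟩
        rintro (hm | ⟨l1, hl1, hp⟩)
        · exact h2 (Or.inl hm)
        · rcases List.mem_cons.mp hl1 with rfl | hl1'
          · exact absurd hp hxy
          · exact h2 (Or.inr ⟨l1, hl1', hp⟩)
    · -- eligible row
      have hs := pvModify_step memo ((pvPairA l0).1 + (pvPairA l0).2) (x + y) hnd
      set memo1 := memo.modify ((pvPairA l0).1 + (pvPairA l0).2) 0 (· + 1) with hmemo1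
      have hA : pvLoopA (x, y) (l0 :: rest) my memo
          = pvLoopA (x, y) rest (pvPairA l0).2 memo1 := by
        simp [pvLoopA, hlt, hmemo1]
      have hB : pvLoopB x y (x + y) (l0 :: rest) my count
          = pvLoopB x y (x + y) rest (pvPairA l0).2
              (if (pvPairA l0).1 + (pvPairA l0).2 > x + y then count + 1 else count) := by
        simp only [pvLoopB]
        rw [if_neg (by simpa [pvPairA] using hlt)]
        rfl
      obtain ⟨ihn, ihs⟩ := ih (pvPairA l0).2 memo1
        (if (pvPairA l0).1 + (pvPairA l0).2 > x + y then count + 1 else count) hs.1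
      refine ⟨fun h => by rw [hB]; exact ihn (by rwa [hA] at h), fun memo' h => ?_⟩
      obtain ⟨h1, h2, h3⟩ := ihs memo' (by rwa [hA] at h)
      refine ⟨h1, ?_, ?_⟩
      · rintro (hm | ⟨l1, hl1, hp⟩)
        · exact h2 (Or.inl (hs.2.1 _ hm))
        · rcases List.mem_cons.mp hl1 with rfl | hl1'
          · refine h2 (Or.inl ?_)
            have hco : (pvPairA l1).1 = x ∧ (pvPairA l1).2 = y := by rw [hp]; exact ⟨rfl, rfl⟩
            rw [← hco.1, ← hco.2]
            exact hs.2.2.1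
          · exact h2 (Or.inr ⟨l1, hl1', hp⟩)
      · rw [hB, h3, hs.2.2.2]
        by_cases hg : (pvPairA l0).1 + (pvPairA l0).2 > x + y
        · rw [if_pos hg, if_pos hg]; ring
        · rw [if_neg hg, if_neg (by omega)]; ring

-- ===== VERDICT (by name: the statement is the Claim_ definition above) =====
theorem solution_spec : Claim_equal_solution := by
  intro scores _ hpre
  obtain ⟨hne, hlen⟩ := hpre
  unfold Spec_solution solution solution_alt
  obtain ⟨h, t, rfl⟩ : ∃ h t, scores = h :: t := by
    cases scores with
    | nil => exact absurd rfl hne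
    | cons h t => exact ⟨h, t, rfl⟩
  simp only [PySem.List.pyGetD_zero_cons]
  set ss := PySem.List.sorted2 (h :: t)
      (fun l => -(PySem.List.pyGetD l 0 0)) (fun l => PySem.List.pyGetD l 1 0) false with hss
  set x := PySem.List.pyGetD h 0 0 with hx
  set y := PySem.List.pyGetD h 1 0 with hy
  set my := PySem.List.pyGetD (PySem.List.pyGetD ss 0 []) 1 0 with hmy
  have hpair : pvPairA h = (x, y) := rfl
  have hmem : h ∈ ss := by
    rw [hss, (PySem.List.sorted2_perm _ _ _ _).mem_iff]
    exact List.mem_cons_self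
  have hmain := pvLoop_main x y ss my PySem.Dict.empty 0 (by simp)
  cases hA : pvLoopA (x, y) ss my PySem.Dict.empty with
  | none =>
    rw [hpair, hA, hmain.1 hA]
  | some memo =>
    obtain ⟨hnd, hgoal, hcount⟩ := hmain.2 memo hA
    have hkey : x + y ∈ memo.keys := hgoal (Or.inr ⟨h, hmem, hpair⟩)
    obtain ⟨⟨k, v⟩, hp, hk⟩ := List.mem_map.mp hkey
    have hk' : k = x + y := hk
    subst hk'
    rw [hpair, hA]
    show pvPhase2 ((x, y).1 + (x, y).2)
        (PySem.List.sorted2 memo.items (fun p => p.1) (fun p => p.2) true) 0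
      = pvLoopB x y (x + y) ss my 0
    set ps := PySem.List.sorted2 memo.items (fun p => p.1) (fun p => p.2) true with hps
    have hperm : ps.Perm memo.items := PySem.List.sorted2_perm _ _ _ _
    have hpmem : ((x + y, v) : Int × Int) ∈ ps := hperm.mem_iff.mpr hp
    have hndps : (ps.map (fun p => p.1)).Nodup :=
      (List.Perm.nodup_iff (List.Perm.map _ hperm)).mpr hnd
    have hpw : ps.Pairwise (fun a b => b.1 < a.1) := by
      have h1 : ps.Pairwise pvLexGe := by rw [hps]; exact pvSorted2_rev_pairwise memo.items
      have h2 : ps.Pairwise (fun a b => a.1 ≠ b.1) := List.pairwise_map.mp hndps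
      exact (List.Pairwise.and h1 h2).imp (by rintro a b ⟨hle, hne⟩; unfold pvLexGe at hle; omega)
    have hempty : pvSumAbove (x + y) (PySem.Dict.empty : PySem.Dict Int Int).items = 0 := rfl
    rw [show ((x, y).1 + (x, y).2 : Int) = x + y from rfl,
        pvPhase2_eq (x + y) ps hpw ⟨v, hpmem⟩ 0, pvSumAbove_perm hperm, hcount, hempty]
    ring
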